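-- pv_equiv track=rewrite | github.com/linhx13/leetcode-code | code/565-array-nesting.py | arrayNesting
-- ===== SOURCE A (Python) =====
-- from typing import List
--
-- def arrayNesting(nums: List[int]) -> int:
--     visited = [False] * len(nums)
--     res = 0
--     for i in range(len(nums)):
--         if not visited[i]:
--             x = nums[i]
--             cnt = 0
--             while True:
--                 cnt += 1
--                 visited[x] = True
--                 x = nums[x]
--                 if x == nums[i]:
--                     break
--         res = max(res, cnt)
--     return res
-- ===== SOURCE B (Python) =====
-- from typing import List
--
-- def arrayNesting(nums: List[int]) -> int:
--     # Walk each index's value cycle independently; no visited bookkeeping.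
--     best = 0
--     for i in range(len(nums)):
--         x = nums[i]
--         k = 1
--         while nums[x] != nums[i]:
--             x = nums[x]
--             k += 1
--         best = max(best, k)
--     return best
-- ===== Notes on version B (the rewrite author's own statement) =====
-- stated objective: simpler
-- what changed: Drops A's visited-array bookkeeping (and its stale-cnt carry into res) and instead walks the value cycle from every index independently, taking the max of the walk lengths; trades A's O(n) marking pass for O(n * cycle) plain walks.
import Mathlib
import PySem

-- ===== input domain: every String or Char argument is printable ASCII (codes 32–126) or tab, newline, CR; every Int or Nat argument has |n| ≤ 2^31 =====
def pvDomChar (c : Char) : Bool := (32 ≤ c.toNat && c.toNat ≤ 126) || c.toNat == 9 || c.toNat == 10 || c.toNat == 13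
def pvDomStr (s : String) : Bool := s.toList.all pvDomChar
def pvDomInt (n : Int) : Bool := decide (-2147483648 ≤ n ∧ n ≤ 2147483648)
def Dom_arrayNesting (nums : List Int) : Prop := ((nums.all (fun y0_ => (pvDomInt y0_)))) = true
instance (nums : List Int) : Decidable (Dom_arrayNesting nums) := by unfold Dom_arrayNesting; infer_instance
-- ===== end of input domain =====

-- B drops A's visited-array marking pass and instead walks the value cycle from every
-- index independently, taking the max of the walk lengths (simpler, no shared state).


-- ===== PORT A =====
-- nums[x] (IndexError defaulted to 0; Pre_ guarantees -len ≤ x < len, where pyGet? is exact)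
def aNext (nums : List Int) (x : Int) : Int := (PySem.List.pyGet? nums x).getD 0
-- Python's index wrap for list assignment: exact for -n ≤ x < n (guaranteed by Pre_)
def wrapIdx (n : Nat) (x : Int) : Nat := (if x < 0 then x + n else x).toNat
-- visited[x] = True
def aMark (visited : List Bool) (x : Int) : List Bool :=
  visited.set (wrapIdx visited.length x) true
-- A's inner 'while True' loop; fuel = len(nums) suffices under Pre_ (a value cycle has at
-- most as many elements as nums has distinct values, proved below)
def aWalk (nums : List Int) : Nat → Int → Int → List Bool → Int → Int × List Bool
  | 0, _, _, visited, cnt => (cnt, visited)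
  | fuel+1, x, start, visited, cnt =>
      let cnt := cnt + 1
      let visited := aMark visited x
      let x' := aNext nums x
      if x' = start then (cnt, visited) else aWalk nums fuel x' start visited cnt

def arrayNesting (nums : List Int) : Int :=
  ((List.range nums.length).foldl
    (fun (st : List Bool × Int × Int) i =>
      let visited := st.1
      let res := st.2.1
      let cnt := st.2.2
      let wc : Int × List Bool :=
        if visited.getD i false then (cnt, visited)
        else
          let start := aNext nums (i : Int)
          aWalk nums nums.length start start visited 0
      (wc.2, max res wc.1, wc.1))
    (List.replicate nums.length false, 0, 0)).2.1

-- ===== PORT B =====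
-- nums[x] (IndexError defaulted to 0; Pre_ guarantees -len ≤ x < len, where pyGet? is exact)
def bNext (nums : List Int) (x : Int) : Int := (PySem.List.pyGet? nums x).getD 0
-- B's 'while nums[x] != nums[i]' loop; fuel = len(nums) suffices under Pre_
def bWalk (nums : List Int) : Nat → Int → Int → Int → Int
  | 0, _, _, k => k
  | fuel+1, x, start, k =>
      if bNext nums x = start then k else bWalk nums fuel (bNext nums x) start (k+1)

def arrayNesting_alt (nums : List Int) : Int :=
  (List.range nums.length).foldl
    (fun best (i : Nat) =>
      max best (bWalk nums nums.length (bNext nums (i : Int)) (bNext nums (i : Int)) 1)) 0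

-- ===== PRECONDITION & SPEC =====
-- Pre_ is exactly the set of inputs on which the Python A returns: every element must be a
-- valid (possibly negative) index, and the value map x ↦ nums[x] must be injective on the
-- distinct values of nums (otherwise some walk never returns to its start and A loops
-- forever, or A hits an IndexError).
def Pre_arrayNesting (nums : List Int) : Prop :=
  (∀ x ∈ nums, PySem.Raise.InRange nums.length x) ∧
  (∀ x ∈ nums, ∀ y ∈ nums, x ≠ y →
    (PySem.List.pyGet? nums x).getD 0 ≠ (PySem.List.pyGet? nums y).getD 0)
instance (nums : List Int) : Decidable (Pre_arrayNesting nums) := by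
  unfold Pre_arrayNesting; infer_instance
def pvWitness_arrayNesting : List Int := [1, 2, 0, 4, 3]

def Spec_arrayNesting (nums : List Int) (out : Int) : Prop := out = arrayNesting_alt nums
instance (nums : List Int) (out : Int) : Decidable (Spec_arrayNesting nums out) := by
  unfold Spec_arrayNesting; infer_instance

-- ===== CLAIM (what is proved, stated in full; the proofs are below) =====
def Claim_equal_arrayNesting : Prop := ∀ (nums : List Int), Dom_arrayNesting nums → Pre_arrayNesting nums → Spec_arrayNesting nums (arrayNesting nums)

-- ===== LEMMAS AND PROOFS =====

-- the value-successor map x ↦ nums[x]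
def fnext (nums : List Int) (x : Int) : Int := (PySem.List.pyGet? nums x).getD 0

-- the length of the value cycle through v (least positive k with f^[k] v = v), made total
-- by the always-true escape disjunct k = n+1; under Pre_ the escape is never least.
def per (nums : List Int) (v : Int) : Nat :=
  Nat.find (p := fun k => k = nums.length + 1 ∨ (0 < k ∧ (fnext nums)^[k] v = v))
    ⟨nums.length + 1, Or.inl rfl⟩

-- reference value: max of cycle lengths of nums[i] over indices i < m
def refMax (nums : List Int) (m : Nat) : Int :=
  (List.range m).foldl (fun r (i : Nat) => max r ((per nums (fnext nums (i : Int)) : Nat) : Int)) 0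

-- j is the wrapped index of some value on the forward orbit of v
def OrbPos (nums : List Int) (v : Int) (j : Nat) : Prop :=
  ∃ s, wrapIdx nums.length ((fnext nums)^[s] v) = j

theorem inRange_bounds (n : Nat) (x : Int) (h : PySem.Raise.InRange n x) :
    -(n : Int) ≤ x ∧ x < n := by
  simpa [PySem.Raise.InRange] using h

theorem pyGet?_wrap (nums : List Int) (x : Int)
    (h : PySem.Raise.InRange nums.length x) :
    PySem.List.pyGet? nums x = nums[wrapIdx nums.length x]? := by
  have hb := inRange_bounds nums.length x h
  rcases lt_or_ge x 0 with hx | hx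
  case inr =>
    rw [PySem.List.pyGet?_of_nonneg (h := hx)]
    unfold wrapIdx
    rw [if_neg (by omega)]
  · have hk0 : 0 < (-x).toNat := by omega
    have hkn : (-x).toNat ≤ nums.length := by omega
    have hxe : x = -(((-x).toNat : Nat) : Int) := by omega
    rw [hxe, PySem.List.pyGet?_neg_natCast _ _ hk0 hkn]
    unfold wrapIdx
    rw [if_pos (by omega)]
    congr 1
    omega

theorem fnext_wrap_getElem (nums : List Int) (x : Int)
    (h : PySem.Raise.InRange nums.length x) (hlt : wrapIdx nums.length x < nums.length) :
    fnext nums x = nums[wrapIdx nums.length x] := by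
  unfold fnext
  rw [pyGet?_wrap nums x h, List.getElem?_eq_getElem hlt]
  rfl

theorem wrapIdx_lt' (n : Nat) (x : Int) (h : PySem.Raise.InRange n x) :
    wrapIdx n x < n := by
  have hb := inRange_bounds n x h
  unfold wrapIdx
  split <;> omega

theorem fnext_mem (nums : List Int) (hp : Pre_arrayNesting nums) (x : Int)
    (hx : x ∈ nums) : fnext nums x ∈ nums := by
  have h := hp.1 x hx
  rw [fnext_wrap_getElem nums x h (wrapIdx_lt' _ _ h)]
  exact List.getElem_mem _

theorem fnext_natCast (nums : List Int) (m : Nat) (hm : m < nums.length) :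
    fnext nums (m : Int) = nums[m] := by
  unfold fnext
  rw [PySem.List.pyGet?_natCast, List.getElem?_eq_getElem hm]
  rfl

theorem idx_mem (nums : List Int) (m : Nat) (hm : m < nums.length) :
    fnext nums (m : Int) ∈ nums := by
  rw [fnext_natCast nums m hm]
  exact List.getElem_mem _

theorem iter_mem (nums : List Int) (hp : Pre_arrayNesting nums) (s : Nat) (x : Int)
    (hx : x ∈ nums) : (fnext nums)^[s] x ∈ nums := by
  induction s with
  | zero => simpa using hx
  | succ s ih =>
      rw [Function.iterate_succ_apply']
      exact fnext_mem nums hp _ ih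

theorem fnext_inj (nums : List Int) (hp : Pre_arrayNesting nums) (x y : Int)
    (hx : x ∈ nums) (hy : y ∈ nums) (h : fnext nums x = fnext nums y) : x = y := by
  by_contra hne
  exact hp.2 x hx y hy hne h

theorem iter_cancel (nums : List Int) (hp : Pre_arrayNesting nums) (a : Nat) (x y : Int)
    (hx : x ∈ nums) (hy : y ∈ nums)
    (h : (fnext nums)^[a] x = (fnext nums)^[a] y) : x = y := by
  induction a with
  | zero => simpa using h
  | succ a ih =>
      rw [Function.iterate_succ_apply', Function.iterate_succ_apply'] at h
      exact ih (fnext_inj nums hp _ _ (iter_mem nums hp a x hx) (iter_mem nums hp a y hy) h)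

theorem per_exists (nums : List Int) (hp : Pre_arrayNesting nums) (v : Int)
    (hv : v ∈ nums) :
    ∃ k, 0 < k ∧ k ≤ nums.length ∧ (fnext nums)^[k] v = v := by
  have hcardle : nums.toFinset.card ≤ nums.length := nums.toFinset_card_le
  have hmap : ∀ s ∈ Finset.range (nums.toFinset.card + 1),
      (fnext nums)^[s] v ∈ nums.toFinset := by
    intro s _
    rw [List.mem_toFinset]
    exact iter_mem nums hp s v hv
  have hcard : nums.toFinset.card < (Finset.range (nums.toFinset.card + 1)).card := by
    simp
  obtain ⟨a, ha, b, hb, hne, heq⟩ :=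
    Finset.exists_ne_map_eq_of_card_lt_of_maps_to hcard hmap
  rw [Finset.mem_range] at ha hb
  rcases Nat.lt_or_ge a b with hab | hab
  · refine ⟨b - a, by omega, by omega, ?_⟩
    have : (fnext nums)^[a] ((fnext nums)^[b - a] v) = (fnext nums)^[a] v := by
      rw [← Function.iterate_add_apply]
      rw [show a + (b - a) = b by omega, heq]
    exact iter_cancel nums hp a _ v (iter_mem nums hp _ v hv) hv this
  · have hba : b < a := by omega
    refine ⟨a - b, by omega, by omega, ?_⟩
    have : (fnext nums)^[b] ((fnext nums)^[a - b] v) = (fnext nums)^[b] v := by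
      rw [← Function.iterate_add_apply]
      rw [show b + (a - b) = a by omega, ← heq]
    exact iter_cancel nums hp b _ v (iter_mem nums hp _ v hv) hv this

theorem per_le (nums : List Int) (hp : Pre_arrayNesting nums) (v : Int)
    (hv : v ∈ nums) : per nums v ≤ nums.length := by
  obtain ⟨k, hk0, hkn, hfix⟩ := per_exists nums hp v hv
  calc per nums v ≤ k := Nat.find_le (Or.inr ⟨hk0, hfix⟩)
    _ ≤ nums.length := hkn

theorem per_pos (nums : List Int) (v : Int) : 0 < per nums v := by
  rcases Nat.eq_zero_or_pos (per nums v) with h | h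
  case inr => exact h
  · exfalso
    have := Nat.find_spec (p := fun k => k = nums.length + 1 ∨ (0 < k ∧ (fnext nums)^[k] v = v))
      ⟨nums.length + 1, Or.inl rfl⟩
    rw [show Nat.find _ = per nums v from rfl, h] at this
    rcases this with h1 | h1
    · omega
    · omega

theorem per_fix (nums : List Int) (hp : Pre_arrayNesting nums) (v : Int)
    (hv : v ∈ nums) : (fnext nums)^[per nums v] v = v := by
  have hle := per_le nums hp v hv
  have := Nat.find_spec (p := fun k => k = nums.length + 1 ∨ (0 < k ∧ (fnext nums)^[k] v = v))
    ⟨nums.length + 1, Or.inl rfl⟩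
  rw [show Nat.find _ = per nums v from rfl] at this
  rcases this with h1 | h1
  · omega
  · exact h1.2

theorem per_min (nums : List Int) (t : Nat) (v : Int) (ht : 0 < t)
    (hlt : t < per nums v) : (fnext nums)^[t] v ≠ v := by
  intro hfix
  exact Nat.find_min (p := fun k => k = nums.length + 1 ∨ (0 < k ∧ (fnext nums)^[k] v = v))
    ⟨nums.length + 1, Or.inl rfl⟩ hlt (Or.inr ⟨ht, hfix⟩)

theorem iter_fix_iff (nums : List Int) (hp : Pre_arrayNesting nums) (v : Int) (k : Nat)
    (hv : v ∈ nums) :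
    (fnext nums)^[k] (fnext nums v) = fnext nums v ↔ (fnext nums)^[k] v = v := by
  constructor
  · intro h
    rw [← Function.iterate_succ_apply, Function.iterate_succ_apply'] at h
    exact fnext_inj nums hp _ _ (iter_mem nums hp k v hv) hv h
  · intro h
    rw [← Function.iterate_succ_apply, Function.iterate_succ_apply', h]

theorem per_f (nums : List Int) (hp : Pre_arrayNesting nums) (v : Int)
    (hv : v ∈ nums) : per nums (fnext nums v) = per nums v := by
  have hiff : ∀ k, (k = nums.length + 1 ∨ (0 < k ∧ (fnext nums)^[k] (fnext nums v) = fnext nums v)) ↔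
      (k = nums.length + 1 ∨ (0 < k ∧ (fnext nums)^[k] v = v)) := by
    intro k
    rw [iter_fix_iff nums hp v k hv]
  exact Nat.find_congr' (fun {k} => hiff k)

theorem per_orbit (nums : List Int) (hp : Pre_arrayNesting nums) (s : Nat) (v : Int)
    (hv : v ∈ nums) : per nums ((fnext nums)^[s] v) = per nums v := by
  induction s with
  | zero => simp
  | succ s ih =>
      rw [Function.iterate_succ_apply']
      rw [per_f nums hp _ (iter_mem nums hp s v hv)]
      exact ih

theorem iter_mul_fix (nums : List Int) (hp : Pre_arrayNesting nums) (v : Int) (q : Nat)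
    (hv : v ∈ nums) : (fnext nums)^[per nums v * q] v = v := by
  induction q with
  | zero => simp
  | succ q ih =>
      rw [Nat.mul_succ, Function.iterate_add_apply, per_fix nums hp v hv, ih]

theorem iter_mod (nums : List Int) (hp : Pre_arrayNesting nums) (v : Int) (s : Nat)
    (hv : v ∈ nums) :
    (fnext nums)^[s] v = (fnext nums)^[s % per nums v] v := by
  conv_lhs => rw [← Nat.div_add_mod s (per nums v)]
  rw [Nat.add_comm, Function.iterate_add_apply, iter_mul_fix nums hp v _ hv]

theorem orbpos_iff (nums : List Int) (hp : Pre_arrayNesting nums) (v : Int) (j : Nat)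
    (hv : v ∈ nums) :
    (∃ s, 1 ≤ s ∧ s ≤ per nums v ∧ wrapIdx nums.length ((fnext nums)^[s-1] v) = j) ↔
      OrbPos nums v j := by
  constructor
  · rintro ⟨s, _, _, hs⟩
    exact ⟨s - 1, hs⟩
  · rintro ⟨s, hs⟩
    have hpos := per_pos nums v
    refine ⟨s % per nums v + 1, by omega, by have := Nat.mod_lt s hpos; omega, ?_⟩
    rw [show s % per nums v + 1 - 1 = s % per nums v from rfl,
      ← iter_mod nums hp v s hv, hs]

theorem wrap_fnext (nums : List Int) (x : Int)
    (h : PySem.Raise.InRange nums.length x) :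
    fnext nums ((wrapIdx nums.length x : Nat) : Int) = fnext nums x := by
  rw [fnext_natCast nums _ (wrapIdx_lt' _ _ h),
    fnext_wrap_getElem nums x h (wrapIdx_lt' _ _ h)]

theorem refMax_succ (nums : List Int) (m : Nat) :
    refMax nums (m+1)
      = max (refMax nums m) ((per nums (fnext nums (m : Int)) : Nat) : Int) := by
  unfold refMax
  rw [List.range_succ, List.foldl_append]
  rfl

theorem le_refMax (nums : List Int) (i m : Nat) (h : i < m) :
    ((per nums (fnext nums (i : Int)) : Nat) : Int) ≤ refMax nums m := by
  induction m with
  | zero => omega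
  | succ m ih =>
      rw [refMax_succ]
      rcases Nat.lt_or_ge i m with h1 | h1
      · exact le_trans (ih h1) (le_max_left _ _)
      · have : i = m := by omega
        subst this
        exact le_max_right _ _

theorem bWalk_spec (nums : List Int) (hp : Pre_arrayNesting nums) (v : Int)
    (hv : v ∈ nums) :
    ∀ fuel t, 1 ≤ t → t ≤ per nums v → per nums v - t + 1 ≤ fuel →
      bWalk nums fuel ((fnext nums)^[t-1] v) v ((t : Nat) : Int)
        = ((per nums v : Nat) : Int) := by
  intro fuel
  induction fuel with
  | zero => intro t h1 h2 h3; omega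
  | succ fuel ih =>
      intro t h1 h2 h3
      unfold bWalk
      have hbf : bNext nums ((fnext nums)^[t-1] v) = (fnext nums)^[t] v := by
        show fnext nums ((fnext nums)^[t-1] v) = (fnext nums)^[t] v
        conv_rhs => rw [show t = (t-1)+1 by omega]
        rw [Function.iterate_succ_apply']
      rw [hbf]
      by_cases hfix : (fnext nums)^[t] v = v
      · have ht : t = per nums v := by
          by_contra hne
          exact per_min nums t v (by omega) (by omega) hfix
        rw [if_pos hfix, ht]
      · have htlt : t < per nums v := by
          rcases Nat.lt_or_ge t (per nums v) with h | h
          · exact h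
          · have : t = per nums v := by omega
            rw [this] at hfix
            exact absurd (per_fix nums hp v hv) hfix
        rw [if_neg hfix]
        have hx : (fnext nums)^[t] v = (fnext nums)^[(t+1)-1] v := by norm_num
        have hcast : ((t : Nat) : Int) + 1 = (((t+1 : Nat) : Nat) : Int) := by push_cast; ring
        rw [hx, hcast]
        exact ih (t+1) (by omega) htlt (by omega)

theorem aWalk_spec (nums : List Int) (hp : Pre_arrayNesting nums) (v : Int)
    (hv : v ∈ nums) :
    ∀ fuel t visited, 1 ≤ t → t ≤ per nums v → per nums v - t + 1 ≤ fuel →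
      visited.length = nums.length →
      (aWalk nums fuel ((fnext nums)^[t-1] v) v visited (((t - 1 : Nat) : Nat) : Int)).1
          = ((per nums v : Nat) : Int) ∧
      (aWalk nums fuel ((fnext nums)^[t-1] v) v visited
          (((t - 1 : Nat) : Nat) : Int)).2.length = nums.length ∧
      ∀ j : Nat, ((aWalk nums fuel ((fnext nums)^[t-1] v) v visited
          (((t - 1 : Nat) : Nat) : Int)).2.getD j false = true ↔
        (visited.getD j false = true ∨
          ∃ s, t ≤ s ∧ s ≤ per nums v ∧ wrapIdx nums.length ((fnext nums)^[s-1] v) = j)) := by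
  intro fuel
  induction fuel with
  | zero => intro t visited h1 h2 h3; omega
  | succ fuel ih =>
      intro t visited h1 h2 h3 hlen
      have hxmem : (fnext nums)^[t-1] v ∈ nums := iter_mem nums hp (t-1) v hv
      have hxrange := hp.1 _ hxmem
      have hxlt : wrapIdx nums.length ((fnext nums)^[t-1] v) < nums.length :=
        wrapIdx_lt' _ _ hxrange
      have hmark : aMark visited ((fnext nums)^[t-1] v)
          = visited.set (wrapIdx nums.length ((fnext nums)^[t-1] v)) true := by
        unfold aMark; rw [hlen]
      have hmark_len :
          (visited.set (wrapIdx nums.length ((fnext nums)^[t-1] v)) true).length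
            = nums.length := by
        rw [List.length_set]; exact hlen
      have hmark_get : ∀ j : Nat,
          ((visited.set (wrapIdx nums.length ((fnext nums)^[t-1] v)) true).getD j false = true ↔
          (visited.getD j false = true ∨ wrapIdx nums.length ((fnext nums)^[t-1] v) = j)) := by
        intro j
        by_cases hj : wrapIdx nums.length ((fnext nums)^[t-1] v) = j
        · subst hj
          rw [List.getD_eq_getElem _ _ (by omega), List.getElem_set_self (by omega)]
          simp
        · constructor
          · intro h
            left
            rw [← h]
            rcases Nat.lt_or_ge j visited.length with hjl | hjl
            · rw [List.getD_eq_getElem _ _ hjl,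
                List.getD_eq_getElem _ _ (by rw [List.length_set]; exact hjl),
                List.getElem_set_ne hj]
            · rw [List.getD_eq_default _ _ hjl,
                List.getD_eq_default _ _ (by rw [List.length_set]; exact hjl)]
          · rintro (h | h)
            · rw [← h]
              rcases Nat.lt_or_ge j visited.length with hjl | hjl
              · rw [List.getD_eq_getElem _ _ hjl,
                  List.getD_eq_getElem _ _ (by rw [List.length_set]; exact hjl),
                  List.getElem_set_ne hj]
              · rw [List.getD_eq_default _ _ hjl,
                  List.getD_eq_default _ _ (by rw [List.length_set]; exact hjl)]
            · exact absurd h hj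
      have hnext : aNext nums ((fnext nums)^[t-1] v) = (fnext nums)^[t] v := by
        show fnext nums ((fnext nums)^[t-1] v) = (fnext nums)^[t] v
        conv_rhs => rw [show t = (t-1)+1 by omega]
        rw [Function.iterate_succ_apply']
      have hcnt : (((t - 1 : Nat) : Nat) : Int) + 1 = ((t : Nat) : Int) := by omega
      by_cases hfix : (fnext nums)^[t] v = v
      · -- the loop breaks now: t = per v
        have ht : t = per nums v := by
          by_contra hne
          exact per_min nums t v (by omega) (by omega) hfix
        subst ht
        unfold aWalk
        simp only [hmark, hnext, hfix, if_true, hcnt]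
        refine ⟨by trivial, hmark_len, ?_⟩
        intro j
        rw [hmark_get j]
        constructor
        · rintro (h | h)
          · exact Or.inl h
          · exact Or.inr ⟨per nums v, le_refl _, le_refl _, h⟩
        · rintro (h | ⟨s, hs1, hs2, hs3⟩)
          · exact Or.inl h
          · have : s = per nums v := by omega
            subst this
            exact Or.inr hs3
      · have htlt : t < per nums v := by
          rcases Nat.lt_or_ge t (per nums v) with h | h
          · exact h
          · have : t = per nums v := by omega
            rw [this] at hfix
            exact absurd (per_fix nums hp v hv) hfix
        unfold aWalk
        simp only [hmark, hnext, if_neg hfix, hcnt]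
        have hshift : (fnext nums)^[t] v = (fnext nums)^[(t+1)-1] v := by norm_num
        have hcast : ((t : Nat) : Int) = (((t + 1 - 1 : Nat) : Nat) : Int) := by omega
        rw [hshift, hcast]
        obtain ⟨g1, g2, g3⟩ := ih (t+1)
          (visited.set (wrapIdx nums.length ((fnext nums)^[t-1] v)) true)
          (by omega) htlt (by omega) hmark_len
        refine ⟨g1, g2, ?_⟩
        intro j
        rw [g3 j, hmark_get j]
        constructor
        · rintro ((h | h) | ⟨s, hs1, hs2, hs3⟩)
          · exact Or.inl h
          · exact Or.inr ⟨t, le_refl _, by omega, h⟩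
          · exact Or.inr ⟨s, by omega, hs2, hs3⟩
        · rintro (h | ⟨s, hs1, hs2, hs3⟩)
          · exact Or.inl (Or.inl h)
          · rcases Nat.eq_or_lt_of_le hs1 with hst | hst
            · exact Or.inl (Or.inr (by rw [← hst] at hs3; exact hs3))
            · exact Or.inr ⟨s, by omega, hs2, hs3⟩

theorem foldl_ext_mem {α : Type} (l : List Nat) (f f' : α → Nat → α) (b : α)
    (h : ∀ i ∈ l, ∀ b, f b i = f' b i) : l.foldl f b = l.foldl f' b := by
  induction l generalizing b with
  | nil => rfl
  | cons x xs ih =>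
      simp only [List.foldl_cons]
      rw [h x (by simp)]
      exact ih _ (fun i hi b => h i (by simp [hi]) b)

theorem alt_eq_refMax (nums : List Int) (hp : Pre_arrayNesting nums) :
    arrayNesting_alt nums = refMax nums nums.length := by
  unfold arrayNesting_alt refMax
  apply foldl_ext_mem
  intro i hi b
  have him : i < nums.length := List.mem_range.mp hi
  congr 1
  have hv : fnext nums (i : Int) ∈ nums := idx_mem nums i him
  have hb : bNext nums (i : Int) = fnext nums (i : Int) := rfl
  have hs := bWalk_spec nums hp _ hv nums.length 1 (le_refl 1) (per_pos nums _)
    (by have := per_le nums hp _ hv; have := per_pos nums (fnext nums (i : Int)); omega)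
  rw [show (fnext nums)^[1-1] (fnext nums (i : Int)) = fnext nums (i : Int) from rfl] at hs
  rw [hb]
  simpa using hs

theorem aFold_spec (nums : List Int) (hp : Pre_arrayNesting nums) (m : Nat)
    (hm : m ≤ nums.length) :
    ((List.range m).foldl
      (fun (st : List Bool × Int × Int) i =>
        let visited := st.1
        let res := st.2.1
        let cnt := st.2.2
        let wc : Int × List Bool :=
          if visited.getD i false then (cnt, visited)
          else
            let start := aNext nums (i : Int)
            aWalk nums nums.length start start visited 0
        (wc.2, max res wc.1, wc.1))
      (List.replicate nums.length false, 0, 0)).1.length = nums.length ∧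
    (∀ j : Nat, (((List.range m).foldl
      (fun (st : List Bool × Int × Int) i =>
        let visited := st.1
        let res := st.2.1
        let cnt := st.2.2
        let wc : Int × List Bool :=
          if visited.getD i false then (cnt, visited)
          else
            let start := aNext nums (i : Int)
            aWalk nums nums.length start start visited 0
        (wc.2, max res wc.1, wc.1))
      (List.replicate nums.length false, 0, 0)).1.getD j false = true ↔
        ∃ m', m' < m ∧ OrbPos nums (fnext nums (m' : Int)) j)) ∧
    ((List.range m).foldl
      (fun (st : List Bool × Int × Int) i =>
        let visited := st.1
        let res := st.2.1
        let cnt := st.2.2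
        let wc : Int × List Bool :=
          if visited.getD i false then (cnt, visited)
          else
            let start := aNext nums (i : Int)
            aWalk nums nums.length start start visited 0
        (wc.2, max res wc.1, wc.1))
      (List.replicate nums.length false, 0, 0)).2.1 = refMax nums m ∧
    ((List.range m).foldl
      (fun (st : List Bool × Int × Int) i =>
        let visited := st.1
        let res := st.2.1
        let cnt := st.2.2
        let wc : Int × List Bool :=
          if visited.getD i false then (cnt, visited)
          else
            let start := aNext nums (i : Int)
            aWalk nums nums.length start start visited 0
        (wc.2, max res wc.1, wc.1))
      (List.replicate nums.length false, 0, 0)).2.2 ≤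
    ((List.range m).foldl
      (fun (st : List Bool × Int × Int) i =>
        let visited := st.1
        let res := st.2.1
        let cnt := st.2.2
        let wc : Int × List Bool :=
          if visited.getD i false then (cnt, visited)
          else
            let start := aNext nums (i : Int)
            aWalk nums nums.length start start visited 0
        (wc.2, max res wc.1, wc.1))
      (List.replicate nums.length false, 0, 0)).2.1 := by
  induction m with
  | zero =>
      refine ⟨by simp, ?_, by simp [refMax], by simp⟩
      intro j
      simp only [List.range_zero, List.foldl_nil]
      constructor
      · intro h
        exfalso
        rcases Nat.lt_or_ge j nums.length with hj | hj
        · rw [List.getD_eq_getElem _ _ (by simpa using hj)] at h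
          simp at h
        · rw [List.getD_eq_default _ _ (by simpa using hj)] at h
          simp at h
      · rintro ⟨m', hm', _⟩; omega
  | succ m ih =>
      obtain ⟨ihlen, ihget, ihres, ihcnt⟩ := ih (by omega)
      rw [List.range_succ, List.foldl_append, List.foldl_cons, List.foldl_nil]
      set prev := ((List.range m).foldl
        (fun (st : List Bool × Int × Int) i =>
        let visited := st.1
        let res := st.2.1
        let cnt := st.2.2
        let wc : Int × List Bool :=
          if visited.getD i false then (cnt, visited)
          else
            let start := aNext nums (i : Int)
            aWalk nums nums.length start start visited 0
        (wc.2, max res wc.1, wc.1))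
      (List.replicate nums.length false, 0, 0)) with hprev
      simp only []
      have hmlt : m < nums.length := by omega
      have hvm : fnext nums (m : Int) ∈ nums := idx_mem nums m hmlt
      by_cases hv : prev.1.getD m false = true
      · -- index m already visited: skip branch
        rw [if_pos hv]
        obtain ⟨m', hm'1, s, hs⟩ := (ihget m).mp hv
        have hv' : fnext nums (m' : Int) ∈ nums := idx_mem nums m' (by omega)
        have hy : (fnext nums)^[s] (fnext nums (m' : Int)) ∈ nums :=
          iter_mem nums hp s _ hv'
        have hfm : fnext nums (m : Int)
            = (fnext nums)^[s+1] (fnext nums (m' : Int)) := by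
          rw [← hs, wrap_fnext nums _ (hp.1 _ hy), Function.iterate_succ_apply']
        have hperm : per nums (fnext nums (m : Int)) = per nums (fnext nums (m' : Int)) := by
          rw [hfm]
          exact per_orbit nums hp (s+1) _ hv'
        refine ⟨ihlen, ?_, ?_, ?_⟩
        · intro j
          show prev.1.getD j false = true ↔ _
          rw [ihget j]
          constructor
          · rintro ⟨k, hk1, hk2⟩; exact ⟨k, by omega, hk2⟩
          · rintro ⟨k, hk1, hk2⟩
            rcases Nat.lt_or_ge k m with hkm | hkm
            · exact ⟨k, hkm, hk2⟩
            · have : k = m := by omega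
              subst this
              obtain ⟨u, hu⟩ := hk2
              refine ⟨m', hm'1, ⟨u + (s+1), ?_⟩⟩
              rw [Function.iterate_add_apply, ← hfm, hu]
        · show max prev.2.1 prev.2.2 = refMax nums (m+1)
          rw [refMax_succ, ihres, max_eq_left (ihres ▸ ihcnt), hperm]
          exact (max_eq_left (le_refMax nums m' m hm'1)).symm
        · show prev.2.2 ≤ max prev.2.1 prev.2.2
          exact le_max_right _ _
      · -- fresh index: walk its cycle
        rw [if_neg hv]
        have hs := aWalk_spec nums hp _ hvm nums.length 1 prev.1 (le_refl 1)
          (per_pos nums _)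
          (by have := per_le nums hp _ hvm; have := per_pos nums (fnext nums (m : Int)); omega)
          ihlen
        rw [show (fnext nums)^[1-1] (fnext nums (m : Int)) = fnext nums (m : Int) from rfl] at hs
        have h0 : (((1 - 1 : Nat) : Nat) : Int) = 0 := by norm_num
        rw [h0] at hs
        have hae : aNext nums (m : Int) = fnext nums (m : Int) := rfl
        rw [hae]
        obtain ⟨w1, w2, w3⟩ := hs
        refine ⟨w2, ?_, ?_, ?_⟩
        · intro j
          rw [w3 j, ihget j]
          constructor
          · rintro (⟨k, hk1, hk2⟩ | hex)
            · exact ⟨k, by omega, hk2⟩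
            · exact ⟨m, by omega, (orbpos_iff nums hp _ j hvm).mp hex⟩
          · rintro ⟨k, hk1, hk2⟩
            rcases Nat.lt_or_ge k m with hkm | hkm
            · exact Or.inl ⟨k, hkm, hk2⟩
            · have : k = m := by omega
              subst this
              exact Or.inr ((orbpos_iff nums hp _ j hvm).mpr hk2)
        · rw [w1, ihres, refMax_succ]
        · rw [w1]
          exact le_max_right _ _

theorem a_eq_refMax (nums : List Int) (hp : Pre_arrayNesting nums) :
    arrayNesting nums = refMax nums nums.length := by
  unfold arrayNesting
  exact (aFold_spec nums hp nums.length (le_refl _)).2.2.1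

-- ===== VERDICT (by name: the statement is the Claim_ definition above) =====
theorem arrayNesting_spec : Claim_equal_arrayNesting := by
  intro nums _hd hp
  unfold Spec_arrayNesting
  rw [a_eq_refMax nums hp, alt_eq_refMax nums hp]
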